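-- pv_equiv track=rewrite | github.com/PKPDAI/PKRelations | pkrex/models/dataloaders.py | reshape_ner_labels
-- ===== SOURCE A (Python) =====
-- from typing import Dict, List, Tuple
--
-- def reshape_ner_labels(inp_ner_labels: List[List[str]], max_len: int):
--     """
--     Given a sequence of IOB tags, if the length of the sequence > max_len, it splits them into two and adds labels
--     for the new [CLS] AND [SEP] tokens
--     """
--     reshaped_labels = []
--     for seq_labels in inp_ner_labels:
--         if len(seq_labels) > max_len:
--             base = 0
--             ending = max_len - 1
--             remaining_seq = seq_labels
--             while len(remaining_seq) > max_len:
--                 new_labels = remaining_seq[base:ending] + ['O']  # append a final O since there will be an extra sep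
--                 # token
--                 assert len(new_labels) == max_len
--                 reshaped_labels.append(new_labels)
--                 remaining_seq = ['O'] + remaining_seq[ending:]  # add the label for the new CLS token
--             reshaped_labels.append(remaining_seq)
--         else:
--             reshaped_labels.append(seq_labels)
--     return reshaped_labels
-- ===== SOURCE B (Python) =====
-- from typing import List
--
-- def reshape_ner_labels(inp_ner_labels: List[List[str]], max_len: int):
--     # Single pass per sequence using an integer offset into the original list,
--     # instead of repeatedly rebuilding the remaining list.
--     out = []
--     for seq in inp_ner_labels:
--         n = len(seq)
--         if n <= max_len:
--             out.append(seq)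
--         else:
--             out.append(seq[:max_len - 1] + ['O'])
--             p = max_len - 1
--             while n - p + 1 > max_len:
--                 out.append(['O'] + seq[p:p + max_len - 2] + ['O'])
--                 p += max_len - 2
--             out.append(['O'] + seq[p:])
--     return out
-- ===== Notes on version B (the rewrite author's own statement) =====
-- stated objective: alternative
-- what changed: B walks each long sequence once with an integer offset and slices chunks directly out of the original list, instead of A's loop that rebuilds the remaining list ['O'] + remaining_seq[ending:] on every iteration.
import Mathlib
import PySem

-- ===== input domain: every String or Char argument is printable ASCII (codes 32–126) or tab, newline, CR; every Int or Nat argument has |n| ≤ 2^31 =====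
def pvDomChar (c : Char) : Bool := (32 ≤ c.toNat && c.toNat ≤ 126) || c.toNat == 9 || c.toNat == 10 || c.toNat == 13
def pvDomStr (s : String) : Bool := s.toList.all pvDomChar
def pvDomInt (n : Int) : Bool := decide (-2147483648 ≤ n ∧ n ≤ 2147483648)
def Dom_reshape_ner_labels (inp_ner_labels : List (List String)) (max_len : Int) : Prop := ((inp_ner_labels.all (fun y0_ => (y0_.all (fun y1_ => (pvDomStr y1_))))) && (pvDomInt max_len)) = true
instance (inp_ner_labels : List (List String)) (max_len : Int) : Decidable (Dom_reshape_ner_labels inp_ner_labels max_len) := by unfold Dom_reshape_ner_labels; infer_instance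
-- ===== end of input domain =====

-- B replaces A's repeated rebuilding of the remaining list by an integer offset into the
-- original sequence; equivalence proved on Pre_ below (return values; neither mutates input).


-- ===== PORT A =====
-- A's `while len(remaining_seq) > max_len` loop; fuel = length of the initial remaining
-- list, which bounds the iteration count whenever the loop terminates (i.e. on Pre_);
-- the fuel-0 fallback is never reached there.
def pvLoopA (m : Int) : Nat → List String → List (List String)
  | 0, rem => [rem]
  | f+1, rem =>
    if (rem.length : Int) > m then
      (PySem.List.slice rem (some 0) (some (m - 1)) ++ ["O"]) ::
        pvLoopA m f ("O" :: PySem.List.slice rem (some (m - 1)) none)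
    else [rem]

def reshape_ner_labels (inp_ner_labels : List (List String)) (max_len : Int) : List (List String) :=
  inp_ner_labels.foldl
    (fun acc seq_labels =>
      if (seq_labels.length : Int) > max_len then
        acc ++ pvLoopA max_len seq_labels.length seq_labels
      else
        acc ++ [seq_labels])
    []

-- ===== PORT B =====
-- B's `while n - p + 1 > max_len` loop over the offset p into the original seq;
-- same fuel convention as above.
def pvLoopB (m : Int) (seq : List String) : Nat → Int → List (List String)
  | 0, p => [["O"] ++ PySem.List.slice seq (some p) none]
  | f+1, p =>
    if (seq.length : Int) - p + 1 > m then
      (["O"] ++ PySem.List.slice seq (some p) (some (p + (m - 2))) ++ ["O"]) ::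
        pvLoopB m seq f (p + (m - 2))
    else [["O"] ++ PySem.List.slice seq (some p) none]

def reshape_ner_labels_alt (inp_ner_labels : List (List String)) (max_len : Int) : List (List String) :=
  inp_ner_labels.foldl
    (fun acc seq =>
      if (seq.length : Int) ≤ max_len then
        acc ++ [seq]
      else
        acc ++ ((PySem.List.slice seq (some 0) (some (max_len - 1)) ++ ["O"]) ::
                  pvLoopB max_len seq seq.length (max_len - 1)))
    []

-- ===== PRECONDITION & SPEC =====
-- Pre_ excludes exactly the inputs on which A does not return: if some sequence is longer
-- than max_len and max_len < 3, A's while loop never shrinks the remaining list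
-- (it diverges for max_len 1 or 2, and its assert fails for max_len ≤ 0).
def Pre_reshape_ner_labels (inp_ner_labels : List (List String)) (max_len : Int) : Prop :=
  3 ≤ max_len ∨ ∀ seq ∈ inp_ner_labels, (seq.length : Int) ≤ max_len
instance (inp_ner_labels : List (List String)) (max_len : Int) : Decidable (Pre_reshape_ner_labels inp_ner_labels max_len) := by unfold Pre_reshape_ner_labels; infer_instance

def pvWitness_reshape_ner_labels : List (List String) × Int := ([["O", "B-X", "I-X", "O", "O"]], 3)

def Spec_reshape_ner_labels (inp_ner_labels : List (List String)) (max_len : Int) (out : List (List String)) : Prop := out = reshape_ner_labels_alt inp_ner_labels max_len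
instance (inp_ner_labels : List (List String)) (max_len : Int) (out : List (List String)) : Decidable (Spec_reshape_ner_labels inp_ner_labels max_len out) := by unfold Spec_reshape_ner_labels; infer_instance

-- ===== CLAIM (what is proved, stated in full; the proofs are below) =====
def Claim_equal_reshape_ner_labels : Prop := ∀ (inp_ner_labels : List (List String)) (max_len : Int), Dom_reshape_ner_labels inp_ner_labels max_len → Pre_reshape_ner_labels inp_ner_labels max_len → Spec_reshape_ner_labels inp_ner_labels max_len (reshape_ner_labels inp_ner_labels max_len)

-- ===== LEMMAS AND PROOFS =====

-- Loop invariant: A's remaining list is always "O" :: seq.drop p for B's offset p.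
lemma pvLoops_agree (m : Int) (hm : 3 ≤ m) (seq : List String) :
    ∀ (fA fB p : Nat), 1 ≤ p → p ≤ seq.length →
      seq.length - p ≤ fA → seq.length - p ≤ fB →
      pvLoopA m fA ("O" :: seq.drop p) = pvLoopB m seq fB (p : Int) := by
  obtain ⟨k, hk, hk1⟩ : ∃ k : Nat, m = (k : Int) + 2 ∧ 1 ≤ k :=
    ⟨(m - 2).toNat, by omega, by omega⟩
  intro fA
  induction fA with
  | zero =>
    intro fB p hp1 hpn hfA hfB
    have hcondB : ¬ ((seq.length : Int) - (p : Int) + 1 > m) := by omega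
    cases fB with
    | zero =>
      rw [pvLoopA, pvLoopB, PySem.List.slice_from_natCast]
      simp
    | succ f =>
      rw [pvLoopA, pvLoopB, if_neg hcondB, PySem.List.slice_from_natCast]
      simp
  | succ fA ih =>
    intro fB p hp1 hpn hfA hfB
    have hlen : ("O" :: seq.drop p).length = seq.length - p + 1 := by
      simp [List.length_drop]
    by_cases h : (seq.length : Int) - (p : Int) + 1 > m
    · -- one more iteration of both loops
      have hcond : ((("O" :: seq.drop p).length : Int) > m) := by
        rw [hlen]; push_cast; omega
      cases fB with
      | zero => omega
      | succ fB' =>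
        rw [pvLoopA, pvLoopB, if_pos hcond, if_pos h]
        have h1 : m - 1 = ((k + 1 : Nat) : Int) := by push_cast; omega
        have h2 : (p : Int) + (m - 2) = ((p + k : Nat) : Int) := by push_cast; omega
        have hheadA : PySem.List.slice ("O" :: seq.drop p) (some 0) (some (m - 1))
            = "O" :: (seq.drop p).take k := by
          rw [h1, PySem.List.slice_zero_start, PySem.List.slice_to_natCast,
              List.take_succ_cons]
        have hheadB : PySem.List.slice seq (some (p : Int)) (some ((p : Int) + (m - 2)))
            = (seq.drop p).take k := by
          rw [h2, PySem.List.slice_natCast]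
          simp
        have htail : ("O" :: PySem.List.slice ("O" :: seq.drop p) (some (m - 1)) none)
            = "O" :: seq.drop (p + k) := by
          rw [h1, PySem.List.slice_from_natCast]
          simp [List.drop_drop]
        rw [hheadA, hheadB, htail, h2]
        rw [ih fB' (p + k) (by omega) (by omega) (by omega) (by omega)]
        simp
    · -- both loops stop
      have hcond : ¬ ((("O" :: seq.drop p).length : Int) > m) := by
        rw [hlen]; push_cast; omega
      cases fB with
      | zero =>
        rw [pvLoopA, pvLoopB, if_neg hcond, PySem.List.slice_from_natCast]
        simp
      | succ f =>
        rw [pvLoopA, pvLoopB, if_neg hcond, if_neg h, PySem.List.slice_from_natCast]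
        simp

-- One long sequence: A's whole loop equals B's first chunk followed by B's loop.
lemma pvSeq_agree (m : Int) (hm : 3 ≤ m) (seq : List String)
    (hlen : (seq.length : Int) > m) :
    pvLoopA m seq.length seq =
      (PySem.List.slice seq (some 0) (some (m - 1)) ++ ["O"]) ::
        pvLoopB m seq seq.length (m - 1) := by
  obtain ⟨f, hf⟩ : ∃ f, seq.length = f + 1 := ⟨seq.length - 1, by omega⟩
  have hp : (m - 1).toNat ≤ seq.length := by omega
  have h1 : m - 1 = (((m - 1).toNat : Nat) : Int) := by omega
  conv_lhs => rw [hf]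
  rw [pvLoopA, if_pos hlen]
  congr 1
  rw [h1, PySem.List.slice_from_natCast]
  have := pvLoops_agree m hm seq f seq.length ((m - 1).toNat)
    (by omega) hp (by omega) (by omega)
  rw [this, ← h1]

-- The two folds agree element by element under Pre_.
lemma pvFold_agree (inp : List (List String)) (m : Int)
    (hpre : Pre_reshape_ner_labels inp m) :
    ∀ acc : List (List String),
      inp.foldl
        (fun acc seq_labels =>
          if (seq_labels.length : Int) > m then
            acc ++ pvLoopA m seq_labels.length seq_labels
          else acc ++ [seq_labels]) acc =
      inp.foldl
        (fun acc seq =>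
          if (seq.length : Int) ≤ m then acc ++ [seq]
          else acc ++ ((PySem.List.slice seq (some 0) (some (m - 1)) ++ ["O"]) ::
                        pvLoopB m seq seq.length (m - 1))) acc := by
  induction inp with
  | nil => intro acc; rfl
  | cons seq rest ih =>
    intro acc
    have hpre' : Pre_reshape_ner_labels rest m := by
      rcases hpre with h | h
      · exact Or.inl h
      · exact Or.inr (fun s hs => h s (List.mem_cons_of_mem _ hs))
    rw [List.foldl_cons, List.foldl_cons]
    by_cases hl : (seq.length : Int) > m
    · have hm : 3 ≤ m := by
        rcases hpre with h | h
        · exact h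
        · exact absurd (h seq List.mem_cons_self) (by omega)
      rw [if_pos hl, if_neg (by omega), pvSeq_agree m hm seq hl]
      exact ih hpre' _
    · rw [if_neg hl, if_pos (by omega)]
      exact ih hpre' _

-- ===== VERDICT (by name: the statement is the Claim_ definition above) =====
theorem reshape_ner_labels_spec : Claim_equal_reshape_ner_labels := by
  intro inp m _ hpre
  unfold Spec_reshape_ner_labels reshape_ner_labels reshape_ner_labels_alt
  exact pvFold_agree inp m hpre []
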